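-- pv_equiv track=rewrite | github.com/rasooll/Python-Learning | Taklif3/2.py | capitalize_word_in_crossword
-- ===== SOURCE A (Python) =====
-- def find_word_horizontal(crossword,word):
--     for row_index, row in enumerate(crossword):
--         row_string = ''.join(row)
--         column_index = row_string.find(word)
--         if(column_index > -1):
--             return [row_index, column_index]
--
-- def find_word_vertical(crossword,word):
--     z=[list(i) for i in zip(*crossword)]
--     for rows in z:
--         row_index = z.index(rows)
--         single_row = ''.join(rows)
--         column_index = single_row.find(word)
--         if column_index >= 0:
--             return([column_index, row_index])
--
-- def capitalize_word_in_crossword(crossword,word):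
--      i_v=-1
--      j_v=-1
--      i_h=-1
--      j_h=-1
--      index_cap = find_word_horizontal(crossword,word)
--      if index_cap is not None:
--         i_h,j_h=index_cap
--      else:
--         index_cap = find_word_vertical(crossword,word)
--         if index_cap is not None:
--            i_v,j_v=index_cap
--
--
--      for row_index in range(len(crossword)):
--          for col_index in range(len(crossword[row_index])):
--
--              for w in range(len(word)):
--                  if i_h is not -1:
--                     if row_index==i_h and col_index==j_h+w:
--                        crossword[row_index][col_index] = (crossword[row_index][col_index]).upper()
--
--                  if i_v is not -1:
--                     if row_index==i_v+w and col_index==j_v: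
--                        crossword[row_index][col_index] = (crossword[row_index][col_index]).upper()
--                     else:
--                        crossword[row_index][col_index] = (crossword[row_index][col_index])
--
--      return (crossword)
-- ===== SOURCE B (Python) =====
-- def _find_in(rows, word):
--     for i, row in enumerate(rows):
--         j = ''.join(row).find(word)
--         if j >= 0:
--             return (i, j)
--     return None
--
-- def capitalize_word_in_crossword(crossword, word):
--     W = len(word)
--     hit = _find_in(crossword, word)
--     if hit is not None:
--         p, start = hit
--         return [[cell.upper() if start <= k < start + W else cell
--                  for k, cell in enumerate(row)] if r == p else row
--                 for r, row in enumerate(crossword)]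
--     hit = _find_in(zip(*crossword), word)
--     if hit is not None:
--         c, start = hit
--         return [[cell.upper() if k == c else cell
--                  for k, cell in enumerate(row)] if start <= r < start + W else row
--                 for r, row in enumerate(crossword)]
--     return crossword
-- ===== Notes on version B (the rewrite author's own statement) =====
-- stated objective: faster
-- what changed: B locates the word once (row scan, then column scan over the zipped columns) and rebuilds only the touched row/segment cells, instead of A's triple nested loop that revisits every cell for every position of the word.
import Mathlib
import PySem

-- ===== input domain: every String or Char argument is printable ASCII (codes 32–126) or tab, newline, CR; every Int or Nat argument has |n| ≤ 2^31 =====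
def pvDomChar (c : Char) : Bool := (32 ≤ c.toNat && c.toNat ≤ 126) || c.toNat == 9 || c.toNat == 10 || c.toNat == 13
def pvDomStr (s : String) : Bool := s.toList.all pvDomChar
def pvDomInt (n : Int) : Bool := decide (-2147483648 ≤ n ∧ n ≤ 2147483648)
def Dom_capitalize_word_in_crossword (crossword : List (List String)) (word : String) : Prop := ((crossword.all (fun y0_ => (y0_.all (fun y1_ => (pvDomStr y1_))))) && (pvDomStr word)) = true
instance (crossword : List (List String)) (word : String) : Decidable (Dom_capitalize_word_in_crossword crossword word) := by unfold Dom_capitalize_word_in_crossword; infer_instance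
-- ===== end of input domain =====

-- B locates the word once (row scan, then column scan) and rebuilds only the touched cells,
-- instead of A's triple loop over every cell × every word position; equivalence is about the
-- RETURN value only (Python A uppercases the argument lists in place, Python B returns fresh rows).

-- ===== PORT A =====

-- zip(*crossword): columns up to the shortest row (empty when crossword is empty);
-- exact because Python's zip stops at the first exhausted row, i.e. after min-length columns,
-- and every index below that minimum is in range for every row (getD's default is never used).
def pyZipStar (crossword : List (List String)) : List (List String) :=
  (List.range (((crossword.map List.length).min?).getD 0)).map
    (fun c => crossword.map (fun r => r.getD c ""))

def fwh_go (word : String) : List (Int × List String) → Option (Int × Int)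
  | [] => none
  | (row_index, row) :: rest =>
    let row_string := PySem.Str.join "" row
    let column_index := PySem.Str.find row_string word
    if column_index > -1 then some (row_index, column_index) else fwh_go word rest

def find_word_horizontal (crossword : List (List String)) (word : String) : Option (Int × Int) :=
  fwh_go word (PySem.List.enumerate crossword 0)

-- z.index(rows): rows is always a member of z here, so the .getD 0 default is never used
def fwv_go (z : List (List String)) (word : String) : List (List String) → Option (Int × Int)
  | [] => none
  | rows :: rest =>
    let row_index : Int := ((PySem.List.index? z rows).getD 0 : Nat)
    let single_row := PySem.Str.join "" rows
    let column_index := PySem.Str.find single_row word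
    if column_index ≥ 0 then some (column_index, row_index) else fwv_go z word rest

def find_word_vertical (crossword : List (List String)) (word : String) : Option (Int × Int) :=
  fwv_go (pyZipStar crossword) word (pyZipStar crossword)

-- the body of A's triple loop, per cell: for w in range(len(word)), conditionally uppercase
def capA_cell (word : String) (i_h j_h i_v j_v : Int) (row_index col_index : Int)
    (cell0 : String) : String :=
  (PySem.List.pyRange 0 (PySem.Str.len word) 1).foldl (fun cell w =>
    let cell := if i_h ≠ -1 then
        (if row_index = i_h ∧ col_index = j_h + w then PySem.Str.upper cell else cell)
      else cell
    if i_v ≠ -1 then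
      (if row_index = i_v + w ∧ col_index = j_v then PySem.Str.upper cell else cell)
    else cell) cell0

-- A's in-place per-cell assignment over range(len(crossword)) × range(len(row)) is rendered as
-- an indexed map: each iteration reads and writes only its own cell (row_index, col_index)
def capitalize_word_in_crossword (crossword : List (List String)) (word : String) :
    List (List String) :=
  let q :=
    match find_word_horizontal crossword word with
    | some (i, j) => (i, j, (-1 : Int), (-1 : Int))
    | none =>
      match find_word_vertical crossword word with
      | some (i, j) => ((-1 : Int), (-1 : Int), i, j)
      | none => ((-1 : Int), (-1 : Int), (-1 : Int), (-1 : Int))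
  (PySem.List.enumerate crossword 0).map (fun rr =>
    (PySem.List.enumerate rr.2 0).map (fun kc =>
      capA_cell word q.1 q.2.1 q.2.2.1 q.2.2.2 rr.1 kc.1 kc.2))

-- ===== PORT B =====

-- _find_in(rows, word): first (index, join(row).find(word)) with a hit
def altFind_go (word : String) : List (Int × List String) → Option (Int × Int)
  | [] => none
  | (i, row) :: rest =>
    let j := PySem.Str.find (PySem.Str.join "" row) word
    if j ≥ 0 then some (i, j) else altFind_go word rest

def capitalize_word_in_crossword_alt (crossword : List (List String)) (word : String) :
    List (List String) :=
  let W : Int := PySem.Str.len word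
  match altFind_go word (PySem.List.enumerate crossword 0) with
  | some (p, start) =>
    (PySem.List.enumerate crossword 0).map (fun rr =>
      if rr.1 = p then
        (PySem.List.enumerate rr.2 0).map (fun kc =>
          if start ≤ kc.1 ∧ kc.1 < start + W then PySem.Str.upper kc.2 else kc.2)
      else rr.2)
  | none =>
    match altFind_go word (PySem.List.enumerate (pyZipStar crossword) 0) with
    | some (c, start) =>
      (PySem.List.enumerate crossword 0).map (fun rr =>
        if start ≤ rr.1 ∧ rr.1 < start + W then
          (PySem.List.enumerate rr.2 0).map (fun kc =>
            if kc.1 = c then PySem.Str.upper kc.2 else kc.2)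
        else rr.2)
    | none => crossword

-- ===== PRECONDITION & SPEC =====
def Spec_capitalize_word_in_crossword (crossword : List (List String)) (word : String) (out : List (List String)) : Prop := out = capitalize_word_in_crossword_alt crossword word
instance (crossword : List (List String)) (word : String) (out : List (List String)) : Decidable (Spec_capitalize_word_in_crossword crossword word out) := by unfold Spec_capitalize_word_in_crossword; infer_instance

-- ===== CLAIM (what is proved, stated in full; the proofs are below) =====
def Claim_equal_capitalize_word_in_crossword : Prop := ∀ (crossword : List (List String)) (word : String), Dom_capitalize_word_in_crossword crossword word → Spec_capitalize_word_in_crossword crossword word (capitalize_word_in_crossword crossword word)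

-- ===== LEMMAS AND PROOFS =====

theorem upperChar_idem (c : Char) :
    PySem.Chars.upperChar (PySem.Chars.upperChar c) = PySem.Chars.upperChar c := by
  unfold PySem.Chars.upperChar PySem.Chars.islower
  by_cases h1 : 'a' ≤ c
  · by_cases h2 : c ≤ 'z'
    · have hc1 : 97 ≤ c.toNat := by
        rw [Char.le_def, UInt32.le_iff_toNat_le] at h1
        exact h1
      have hc2 : c.toNat ≤ 122 := by
        rw [Char.le_def, UInt32.le_iff_toNat_le] at h2
        exact h2
      have hv : (Char.ofNat (c.toNat - 32)).toNat = c.toNat - 32 := by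
        rw [Char.toNat_ofNat, if_pos]
        left
        omega
      simp only [h1, h2, decide_true, Bool.and_self, if_true]
      have hlt : ¬ ('a' ≤ Char.ofNat (c.toNat - 32)) := by
        rw [Char.le_def, UInt32.le_iff_toNat_le]
        show ¬ ((97 : Nat) ≤ (Char.ofNat (c.toNat - 32)).toNat)
        rw [hv]
        omega
      simp [hlt]
    · simp [h2]
  · simp [h1]

theorem upper_idem (s : String) :
    PySem.Str.upper (PySem.Str.upper s) = PySem.Str.upper s := by
  simp [PySem.Str.upper, PySem.Chars.upper, List.map_map]
  simp [Function.comp_def, upperChar_idem]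

theorem foldl_ite_upper (P : Int → Prop) [DecidablePred P] (ws : List Int) (c : String) :
    ws.foldl (fun cell w => if P w then PySem.Str.upper cell else cell) c
      = if ∃ w ∈ ws, P w then PySem.Str.upper c else c := by
  induction ws generalizing c with
  | nil => simp
  | cons w ws ih =>
    by_cases h : P w
    · simp [List.foldl_cons, h, ih, upper_idem]
    · simp only [List.foldl_cons, if_neg h, ih]
      by_cases h2 : ∃ x ∈ ws, P x
      · simp [h2, h]
      · simp [h2, h]

theorem capA_cell_h (word : String) (p start r k : Int) (cell : String) (hp : p ≠ -1) :
    capA_cell word p start (-1) (-1) r k cell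
      = if r = p ∧ start ≤ k ∧ k < start + PySem.Str.len word then PySem.Str.upper cell
        else cell := by
  unfold capA_cell
  simp only [if_pos hp, ne_eq, not_true_eq_false, if_false]
  rw [foldl_ite_upper (fun w => r = p ∧ k = start + w)]
  have hiff : (∃ w ∈ PySem.List.pyRange 0 (PySem.Str.len word) 1, r = p ∧ k = start + w)
      ↔ (r = p ∧ start ≤ k ∧ k < start + PySem.Str.len word) := by
    constructor
    · rintro ⟨w, hw, hr, hk⟩
      rw [PySem.List.mem_pyRange_one] at hw
      exact ⟨hr, by omega, by omega⟩
    · rintro ⟨hr, h1, h2⟩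
      exact ⟨k - start, PySem.List.mem_pyRange_one.mpr ⟨by omega, by omega⟩, hr, by omega⟩
  rw [if_congr hiff rfl rfl]

theorem capA_cell_v (word : String) (c start r k : Int) (cell : String) (hs : start ≠ -1) :
    capA_cell word (-1) (-1) start c r k cell
      = if (start ≤ r ∧ r < start + PySem.Str.len word) ∧ k = c then PySem.Str.upper cell
        else cell := by
  unfold capA_cell
  simp only [if_pos hs, ne_eq, not_true_eq_false, if_false]
  rw [foldl_ite_upper (fun w => r = start + w ∧ k = c)]
  have hiff : (∃ w ∈ PySem.List.pyRange 0 (PySem.Str.len word) 1, r = start + w ∧ k = c)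
      ↔ ((start ≤ r ∧ r < start + PySem.Str.len word) ∧ k = c) := by
    constructor
    · rintro ⟨w, hw, hr, hk⟩
      rw [PySem.List.mem_pyRange_one] at hw
      exact ⟨⟨by omega, by omega⟩, hk⟩
    · rintro ⟨⟨h1, h2⟩, hk⟩
      exact ⟨r - start, PySem.List.mem_pyRange_one.mpr ⟨by omega, by omega⟩, by omega, hk⟩
  rw [if_congr hiff rfl rfl]

theorem capA_cell_none (word : String) (r k : Int) (cell : String) :
    capA_cell word (-1) (-1) (-1) (-1) r k cell = cell := by
  unfold capA_cell
  simp only [ne_eq, not_true_eq_false, if_false]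
  generalize PySem.List.pyRange 0 (PySem.Str.len word) 1 = ws
  induction ws generalizing cell with
  | nil => rfl
  | cons w ws ih => simp [ih cell]

theorem fwh_eq_alt (word : String) (l : List (Int × List String)) :
    fwh_go word l = altFind_go word l := by
  induction l with
  | nil => rfl
  | cons x rest ih =>
    obtain ⟨i, row⟩ := x
    simp only [fwh_go, altFind_go]
    have hiff : (PySem.Str.find (PySem.Str.join "" row) word > -1)
        ↔ (PySem.Str.find (PySem.Str.join "" row) word ≥ 0) := by omega
    by_cases h : PySem.Str.find (PySem.Str.join "" row) word ≥ 0
    · rw [if_pos (hiff.mpr h), if_pos h]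
    · rw [if_neg (fun hh => h (hiff.mp hh)), if_neg h, ih]

theorem altFind_bounds (word : String) (l : List (List String)) (n : Int) (i j : Int)
    (h : altFind_go word (PySem.List.enumerate l n) = some (i, j)) : n ≤ i ∧ 0 ≤ j := by
  induction l generalizing n with
  | nil => simp [PySem.List.enumerate_nil, altFind_go] at h
  | cons row rest ih =>
    rw [PySem.List.enumerate_cons] at h
    simp only [altFind_go] at h
    by_cases hf : PySem.Str.find (PySem.Str.join "" row) word ≥ 0
    · rw [if_pos hf] at h
      obtain ⟨rfl, rfl⟩ : n = i ∧ PySem.Str.find (PySem.Str.join "" row) word = j := by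
        constructor <;> (cases h; rfl)
      exact ⟨le_refl _, hf⟩
    · rw [if_neg hf] at h
      have := ih (n + 1) h
      omega

theorem fwv_gen (word : String) (z : List (List String)) (s : List (List String)) (n : Nat)
    (heq : z = z.take n ++ s)
    (hpre : ∀ col ∈ z.take n, PySem.Str.find (PySem.Str.join "" col) word < 0) :
    fwv_go z word s
      = (altFind_go word (PySem.List.enumerate s n)).map (fun p => (p.2, p.1)) := by
  induction s generalizing n with
  | nil => simp [fwv_go, altFind_go, PySem.List.enumerate_nil]
  | cons rows rest ih =>
    have hn : (z.take n).length = n := by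
      have h1 := congrArg List.length heq
      rw [List.length_append, List.length_cons] at h1
      have h2 : (z.take n).length = min n z.length := List.length_take
      omega
    have hdrop : z.drop n = rows :: rest := by
      have h2 := List.take_append_drop n z
      exact List.append_cancel_left (h2.trans heq)
    rw [PySem.List.enumerate_cons]
    by_cases hf : PySem.Str.find (PySem.Str.join "" rows) word ≥ 0
    · have hidx : PySem.List.index? z rows = some n := by
        rw [PySem.List.index?_eq_some_iff]
        refine ⟨z.take n, rest, heq, hn, ?_⟩
        intro hmem
        have := hpre rows hmem
        omega
      simp only [fwv_go, altFind_go, hidx, if_pos hf, Option.getD_some, Option.map_some]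
    · have htake : z.take (n + 1) = z.take n ++ [rows] := by
        rw [List.take_add, hdrop]
        rfl
      have heq' : z = z.take (n + 1) ++ rest := by
        rw [htake, List.append_assoc]
        exact heq
      have hpre' : ∀ col ∈ z.take (n + 1), PySem.Str.find (PySem.Str.join "" col) word < 0 := by
        intro col hcol
        rw [htake, List.mem_append, List.mem_singleton] at hcol
        rcases hcol with h | rfl
        · exact hpre col h
        · omega
      have := ih (n + 1) heq' hpre'
      simp only [fwv_go, altFind_go, if_neg hf]
      rw [this]
      norm_num

theorem vertical_eq (cw : List (List String)) (word : String) :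
    find_word_vertical cw word
      = (altFind_go word (PySem.List.enumerate (pyZipStar cw) 0)).map (fun p => (p.2, p.1)) := by
  unfold find_word_vertical
  exact fwv_gen word _ _ 0 (by simp) (by simp)

theorem inner_id (word : String) (i_h j_h i_v j_v r : Int) (row : List String)
    (h : ∀ kc ∈ PySem.List.enumerate row 0,
      capA_cell word i_h j_h i_v j_v r kc.1 kc.2 = kc.2) :
    (PySem.List.enumerate row 0).map
      (fun kc => capA_cell word i_h j_h i_v j_v r kc.1 kc.2) = row := by
  rw [List.map_congr_left h]
  exact PySem.List.map_snd_enumerate row 0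

-- ===== VERDICT (by name: the statement is the Claim_ definition above) =====
theorem capitalize_word_in_crossword_spec : Claim_equal_capitalize_word_in_crossword := by
  intro cw word _hdom
  unfold Spec_capitalize_word_in_crossword
  unfold capitalize_word_in_crossword capitalize_word_in_crossword_alt
  cases hh : altFind_go word (PySem.List.enumerate cw 0) with
  | some pj =>
    obtain ⟨p, start⟩ := pj
    have hb := altFind_bounds word cw 0 p start hh
    simp only [find_word_horizontal, fwh_eq_alt, hh]
    apply List.map_congr_left
    intro rr _
    by_cases hr : rr.1 = p
    · rw [if_pos hr]
      apply List.map_congr_left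
      intro kc _
      rw [capA_cell_h word p start rr.1 kc.1 kc.2 (by omega)]
      simp [hr]
    · rw [if_neg hr]
      apply inner_id
      intro kc _
      rw [capA_cell_h word p start rr.1 kc.1 kc.2 (by omega)]
      simp [hr]
  | none =>
    simp only [find_word_horizontal, fwh_eq_alt, hh, vertical_eq]
    cases h2 : altFind_go word (PySem.List.enumerate (pyZipStar cw) 0) with
    | some cs =>
      obtain ⟨c, start⟩ := cs
      have hb := altFind_bounds word (pyZipStar cw) 0 c start h2
      simp only [Option.map_some]
      apply List.map_congr_left
      intro rr _
      by_cases hg : start ≤ rr.1 ∧ rr.1 < start + PySem.Str.len word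
      · rw [if_pos hg]
        apply List.map_congr_left
        intro kc _
        rw [capA_cell_v word c start rr.1 kc.1 kc.2 (by omega)]
        have hcnd : ((start ≤ rr.1 ∧ rr.1 < start + PySem.Str.len word) ∧ kc.1 = c)
            ↔ (kc.1 = c) := ⟨fun h => h.2, fun h => ⟨hg, h⟩⟩
        rw [if_congr hcnd rfl rfl]
      · rw [if_neg hg]
        apply inner_id
        intro kc _
        rw [capA_cell_v word c start rr.1 kc.1 kc.2 (by omega)]
        exact if_neg (fun h => hg h.1)
    | none =>
      simp only [Option.map_none]
      rw [List.map_congr_left (fun rr _ => inner_id word (-1) (-1) (-1) (-1) rr.1 rr.2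
        (fun kc _ => capA_cell_none word rr.1 kc.1 kc.2))]
      exact PySem.List.map_snd_enumerate cw 0
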